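-- pv_equiv track=rewrite | github.com/benjamindominikmaier/mixedstrobes_altstrobes | src/matching_analysis_bio.py | get_sequence_coverage
-- ===== SOURCE A (Python) =====
-- def get_sequence_coverage(positions, k_len):
--     covered_bases = 0
--
--     if len(positions) == 0:
--         return 0
--
--     prev_p = positions[0]
--     covered_bases += k_len  # for first pos
--     if len(positions) == 1:
--         return covered_bases
--
--     for p in positions[1:]:
--         if p <= prev_p + k_len - 1:
--             covered_bases += p-prev_p
--         else:
--             covered_bases += k_len
--         prev_p = p
--     return covered_bases
-- ===== SOURCE B (Python) =====
-- def get_sequence_coverage(positions, k_len):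
--     n = len(positions)
--     if n == 0:
--         return 0
--
--     def cov(lo, hi):
--         # coverage of positions[lo:hi], requires lo < hi
--         if hi - lo == 1:
--             return k_len
--         mid = (lo + hi) // 2
--         junction = min(positions[mid] - positions[mid - 1], k_len)
--         return cov(lo, mid) + cov(mid, hi) + junction - k_len
--
--     return cov(0, n)
-- ===== Notes on version B (the rewrite author's own statement) =====
-- stated objective: alternative
-- what changed: Replaces A's single left-to-right scan with carried prev_p by a divide-and-conquer recursion over index ranges: coverage of positions[lo:hi] is computed by halving the range and combining the two halves with a junction term min(positions[mid]-positions[mid-1], k_len) - k_len.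
import Mathlib
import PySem

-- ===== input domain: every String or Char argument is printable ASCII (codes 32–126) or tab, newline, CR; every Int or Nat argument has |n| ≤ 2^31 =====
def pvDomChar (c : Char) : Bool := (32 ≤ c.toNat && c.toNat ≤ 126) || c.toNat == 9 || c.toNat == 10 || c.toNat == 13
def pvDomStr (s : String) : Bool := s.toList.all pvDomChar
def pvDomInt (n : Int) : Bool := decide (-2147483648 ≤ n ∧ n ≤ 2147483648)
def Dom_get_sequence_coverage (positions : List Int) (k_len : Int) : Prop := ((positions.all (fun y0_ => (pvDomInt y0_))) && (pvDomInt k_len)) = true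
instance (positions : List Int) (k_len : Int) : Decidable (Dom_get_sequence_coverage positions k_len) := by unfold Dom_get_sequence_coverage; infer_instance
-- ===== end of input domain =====

-- B computes coverage by divide-and-conquer over index ranges (halving with a junction correction) instead of A's single left-to-right scan; alternative algorithm, same O(n) cost. Return value only; neither mutates its input.


-- ===== PORT A =====
def get_sequence_coverage (positions : List Int) (k_len : Int) : Int :=
  match positions with
  | [] => 0
  | p0 :: rest =>
    -- covered_bases = 0; prev_p = positions[0]; covered_bases += k_len
    let covered_bases : Int := 0 + k_len
    if rest = [] then covered_bases
    else
      (rest.foldl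
        (fun (st : Int × Int) p =>
          if p ≤ st.2 + k_len - 1 then (st.1 + (p - st.2), p) else (st.1 + k_len, p))
        (covered_bases, p0)).1

-- ===== PORT B =====
-- Python's inner 'cov(lo, hi)', closing over positions and k_len.  It is only ever
-- called with 0 ≤ lo < mid < hi ≤ len(positions), so the Python indexings
-- positions[mid] and positions[mid-1] are always in range: List.getD's default 0 is
-- never used and the port is exact.  '(lo+hi)//2' on the nonnegative lo,hi is Nat division.
def covDC (positions : List Int) (k_len : Int) (lo hi : Nat) : Int :=
  if hi ≤ lo + 1 then k_len
  else
    -- mid = (lo + hi) // 2; junction = min(positions[mid] - positions[mid-1], k_len)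
    covDC positions k_len lo ((lo + hi) / 2) + covDC positions k_len ((lo + hi) / 2) hi
      + min (positions.getD ((lo + hi) / 2) 0 - positions.getD ((lo + hi) / 2 - 1) 0) k_len
      - k_len
termination_by hi - lo
decreasing_by all_goals omega

def get_sequence_coverage_alt (positions : List Int) (k_len : Int) : Int :=
  if positions.length = 0 then 0
  else covDC positions k_len 0 positions.length

-- ===== PRECONDITION & SPEC =====
def Spec_get_sequence_coverage (positions : List Int) (k_len : Int) (out : Int) : Prop := out = get_sequence_coverage_alt positions k_len
instance (positions : List Int) (k_len : Int) (out : Int) : Decidable (Spec_get_sequence_coverage positions k_len out) := by unfold Spec_get_sequence_coverage; infer_instance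

-- ===== CLAIM (what is proved, stated in full; the proofs are below) =====
def Claim_equal_get_sequence_coverage : Prop := ∀ (positions : List Int) (k_len : Int), Dom_get_sequence_coverage positions k_len → Spec_get_sequence_coverage positions k_len (get_sequence_coverage positions k_len)

-- ===== LEMMAS AND PROOFS =====

-- the per-junction coverage increment, by index
def adjTerm (positions : List Int) (k_len : Int) (i : Nat) : Int :=
  min (positions.getD (i + 1) 0 - positions.getD i 0) k_len

-- B's divide-and-conquer equals k_len plus the sum of the junction terms of the range.
theorem covDC_eq_sum (positions : List Int) (k_len : Int) :
    ∀ (lo hi : Nat), lo < hi →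
      covDC positions k_len lo hi
        = k_len + ((List.range' lo (hi - 1 - lo)).map (adjTerm positions k_len)).sum := by
  intro lo hi
  induction hd : hi - lo using Nat.strong_induction_on generalizing lo hi with
  | _ d ih =>
    intro hlt
    rw [covDC]
    split_ifs with h1
    · have : hi - 1 - lo = 0 := by omega
      simp [this]
    · have hmid1 : lo < (lo + hi) / 2 := by omega
      have hmid2 : (lo + hi) / 2 < hi := by omega
      rw [ih ((lo + hi) / 2 - lo) (by omega) lo ((lo + hi) / 2) rfl hmid1,
          ih (hi - (lo + hi) / 2) (by omega) ((lo + hi) / 2) hi rfl hmid2]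
      generalize hm : (lo + hi) / 2 = mid at hmid1 hmid2 ⊢
      have hsplit : List.range' lo (hi - 1 - lo)
          = List.range' lo (mid - 1 - lo) ++ (mid - 1) :: List.range' mid (hi - 1 - mid) := by
        have h2 : (mid - 1) :: List.range' mid (hi - 1 - mid)
            = List.range' (mid - 1) ((hi - 1 - mid) + 1) := by
          rw [List.range'_succ]
          have hx : mid - 1 + 1 = mid := by omega
          rw [hx]
        rw [h2]
        have key : List.range' lo ((mid - 1 - lo) + ((hi - 1 - mid) + 1))
            = List.range' lo (mid - 1 - lo)
              ++ List.range' (lo + (mid - 1 - lo)) ((hi - 1 - mid) + 1) :=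
          (List.range'_append_1 ..).symm
        have e1 : hi - 1 - lo = (mid - 1 - lo) + ((hi - 1 - mid) + 1) := by omega
        have e2 : lo + (mid - 1 - lo) = mid - 1 := by omega
        rw [e1, key, e2]
      rw [hsplit]
      simp only [List.map_append, List.map_cons, List.sum_append, List.sum_cons]
      have hadj : adjTerm positions k_len (mid - 1)
          = min (positions.getD mid 0 - positions.getD (mid - 1) 0) k_len := by
        unfold adjTerm
        have hx : mid - 1 + 1 = mid := by omega
        rw [hx]
      rw [hadj]
      ring

-- A's loop from state (acc, prev) sums min(p - prev, k) over adjacent pairs.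
theorem loopA_eq (k : Int) :
    ∀ (rest : List Int) (acc prev : Int),
      (rest.foldl
        (fun (st : Int × Int) p =>
          if p ≤ st.2 + k - 1 then (st.1 + (p - st.2), p) else (st.1 + k, p))
        (acc, prev)).1
      = acc + (((prev :: rest).zip rest).map (fun pr => min (pr.2 - pr.1) k)).sum := by
  intro rest
  induction rest with
  | nil => intro acc prev; simp
  | cons p rs ih =>
    intro acc prev
    simp only [List.foldl, List.zip_cons_cons, List.map_cons, List.sum_cons]
    rw [ih]
    split_ifs with h
    · have : min (p - prev) k = p - prev := by omega
      rw [this]; ring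
    · have : min (p - prev) k = k := by omega
      rw [this]; ring

-- the zip-of-adjacent-pairs sum re-expressed as an index sum
theorem zip_sum_index (k : Int) :
    ∀ (t : List Int) (x : Int),
      (((x :: t).zip t).map (fun pr => min (pr.2 - pr.1) k)).sum
        = ((List.range t.length).map (adjTerm (x :: t) k)).sum := by
  intro t
  induction t with
  | nil => intro x; simp
  | cons y s ih =>
    intro x
    simp only [List.zip_cons_cons, List.map_cons, List.sum_cons, List.length_cons,
      List.range_succ_eq_map, List.map_map]
    rw [ih y]
    have hhead : adjTerm (x :: y :: s) k 0 = min (y - x) k := by simp [adjTerm]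
    have htail : (List.range s.length).map (adjTerm (x :: y :: s) k ∘ Nat.succ)
        = (List.range s.length).map (adjTerm (y :: s) k) := by
      apply List.map_congr_left
      intro i _
      simp [adjTerm]
    rw [hhead, htail]

-- ===== VERDICT (by name: the statement is the Claim_ definition above) =====
theorem get_sequence_coverage_spec : Claim_equal_get_sequence_coverage := by
  unfold Claim_equal_get_sequence_coverage
  intro positions k_len _
  unfold Spec_get_sequence_coverage get_sequence_coverage get_sequence_coverage_alt
  match positions with
  | [] => rfl
  | p0 :: rest =>
    simp only [List.length_cons, Nat.succ_ne_zero, if_false]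
    rw [covDC_eq_sum _ _ 0 (rest.length + 1) (Nat.succ_pos _)]
    cases rest with
    | nil => simp
    | cons p1 rs =>
      rw [if_neg (by simp), loopA_eq, zip_sum_index]
      simp [List.range_eq_range']
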